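-- pv_equiv track=rewrite | github.com/alexkuck/geoff | process/cache.py | search
-- ===== SOURCE A (Python) =====
-- def search(city_list, nset):
--     lset = set()
--     i = 0
--     for row in city_list:
--         if int(row[0]) in nset:
--             lset.add(i)
--             try:
--                 nset.remove(int(row[0])) # only get the first occurence
--             except KeyError:
--                 pass
--         i += 1
--     return lset
-- ===== SOURCE B (Python) =====
-- def search(city_list, nset):
--     # index first occurrences, then select; nset is only mutated afterwards
--     first = {}
--     for i, row in enumerate(city_list):
--         first.setdefault(int(row[0]), i)
--     lset = {i for cid, i in first.items() if cid in nset}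
--     for cid in first:
--         if cid in nset:
--             nset.remove(cid)
--     return lset
-- ===== Notes on version B (the rewrite author's own statement) =====
-- stated objective: alternative
-- what changed: B builds a first-occurrence index dict over city_list without consulting nset, then selects the indices of ids that are in nset in a separate pass (and removes them from nset afterwards), instead of A's single scan that removes each matched id from nset in-loop to suppress repeats.
import Mathlib
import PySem

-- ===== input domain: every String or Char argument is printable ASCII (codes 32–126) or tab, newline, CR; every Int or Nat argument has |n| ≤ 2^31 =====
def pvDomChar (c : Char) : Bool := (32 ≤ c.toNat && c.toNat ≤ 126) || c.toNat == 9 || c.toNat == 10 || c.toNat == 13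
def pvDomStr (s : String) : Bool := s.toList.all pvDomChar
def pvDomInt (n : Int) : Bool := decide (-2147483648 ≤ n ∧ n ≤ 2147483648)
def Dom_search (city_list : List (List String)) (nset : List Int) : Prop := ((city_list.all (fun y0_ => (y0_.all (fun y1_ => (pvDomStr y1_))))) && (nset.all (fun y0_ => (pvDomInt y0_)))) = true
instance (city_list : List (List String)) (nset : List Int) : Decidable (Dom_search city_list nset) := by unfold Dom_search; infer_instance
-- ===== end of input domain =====

-- B replaces A's in-loop removal from nset by a first-occurrence index dict built
-- without consulting nset, then a separate selection pass over the dict's items.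
-- The equivalence proved here is about the RETURN value only; in Python both leave
-- nset equally mutated (B removes every matched id in a final pass).


-- ===== PORT A =====
-- A's loop: hand-kept counter i, lset accumulated, nset shrunk in place by remove
-- (the try/except around remove is the 'match remove? with | none => ns' arm).
-- The 'none' parse arm (row[0] missing or not an int literal) is where Python raises
-- IndexError/ValueError; those inputs are excluded by Pre_search.
def searchGo : List (List String) → Int → PySem.Set Int → List Int → PySem.Set Int
  | [], _, lset, _ => lset
  | row :: rest, i, lset, ns =>
    match (PySem.List.pyGet? row 0).bind PySem.Int.ofStr? with
    | none => lset
    | some cid =>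
      if PySem.Set.contains ns cid then
        searchGo rest (i + 1) (PySem.Set.add lset i)
          (match PySem.Set.remove? ns cid with
           | some ns' => ns'
           | none => ns)
      else searchGo rest (i + 1) lset ns

def search (city_list : List (List String)) (nset : List Int) : List Int :=
  searchGo city_list 0 PySem.Set.empty nset

-- ===== PORT B =====
-- first pass: first.setdefault(int(row[0]), i) over enumerate(city_list); nset untouched.
-- The 'none' parse arm is where Python raises (outside Pre_search).
def buildFirst : List (Int × List String) → PySem.Dict Int Int → PySem.Dict Int Int
  | [], d => d
  | (i, row) :: rest, d =>
    match (PySem.List.pyGet? row 0).bind PySem.Int.ofStr? with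
    | none => d
    | some cid =>
      buildFirst rest (if PySem.Dict.contains d cid then d else PySem.Dict.insert d cid i)

-- second pass: the set comprehension {i for cid, i in first.items() if cid in nset}
def collectGo (ns : List Int) : List (Int × Int) → PySem.Set Int → PySem.Set Int
  | [], lset => lset
  | (cid, i) :: rest, lset =>
    if PySem.Set.contains ns cid then collectGo ns rest (PySem.Set.add lset i)
    else collectGo ns rest lset

-- (Source B's final 'for cid in first: if cid in nset: nset.remove(cid)' only mutates the
-- argument and does not affect the returned value, so it has no counterpart here.)
def search_alt (city_list : List (List String)) (nset : List Int) : List Int :=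
  collectGo nset (PySem.Dict.items (buildFirst (PySem.List.enumerate city_list) PySem.Dict.empty)) PySem.Set.empty

-- ===== PRECONDITION & SPEC =====
-- Pre_ excludes exactly the inputs where Python A raises: some row is empty (IndexError
-- on row[0]) or its first entry is not an int literal (ValueError from int(...)).
def Pre_search (city_list : List (List String)) (nset : List Int) : Prop :=
  ∀ row ∈ city_list, ((PySem.List.pyGet? row 0).bind PySem.Int.ofStr?).isSome
instance (city_list : List (List String)) (nset : List Int) : Decidable (Pre_search city_list nset) := by unfold Pre_search; infer_instance
def pvWitness_search : List (List String) × List Int := ([["1"], ["2"], ["1"]], [1, 3])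
def Spec_search (city_list : List (List String)) (nset : List Int) (out : List Int) : Prop := out = search_alt city_list nset
instance (city_list : List (List String)) (nset : List Int) (out : List Int) : Decidable (Spec_search city_list nset out) := by unfold Spec_search; infer_instance

-- ===== CLAIM (what is proved, stated in full; the proofs are below) =====
def Claim_equal_search : Prop := ∀ (city_list : List (List String)) (nset : List Int), Dom_search city_list nset → Pre_search city_list nset → Spec_search city_list nset (search city_list nset)

-- ===== LEMMAS AND PROOFS =====

theorem pv_contains_filter (l : List Int) (p : Int → Bool) (x : Int) :
    (l.filter p).contains x = (l.contains x && p x) := by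
  induction l with
  | nil => simp
  | cons h t ih =>
    by_cases hx : x = h
    · subst hx
      cases hp : p x <;> simp [List.filter_cons, hp, ih]
    · cases hp : p h <;> simp [List.filter_cons, hp, List.contains_cons, hx, ih]

theorem pv_collect_cons (ns : List Int) (cid i : Int) (rest : List (Int × Int)) (lset : PySem.Set Int) :
    collectGo ns ((cid, i) :: rest) lset
      = if PySem.Set.contains ns cid then collectGo ns rest (PySem.Set.add lset i)
        else collectGo ns rest lset := rfl

theorem pv_collect_append (ns : List Int) (xs ys : List (Int × Int)) (lset : PySem.Set Int) :
    collectGo ns (xs ++ ys) lset = collectGo ns ys (collectGo ns xs lset) := by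
  induction xs generalizing lset with
  | nil => simp [collectGo]
  | cons p rest ih =>
    obtain ⟨cid, i⟩ := p
    rw [List.cons_append, pv_collect_cons, pv_collect_cons]
    by_cases h : PySem.Set.contains ns cid = true
    · rw [if_pos h, if_pos h, ih]
    · rw [if_neg h, if_neg h, ih]

-- invariant: A's shrinking nset is the original nset filtered by the keys recorded so
-- far in B's dict, and A's lset so far is B's selection pass run over those items.
theorem pv_loop_eq (rows : List (List String)) :
    ∀ (i : Int) (d : PySem.Dict Int Int) (ns0 : List Int),
      searchGo rows i (collectGo ns0 d.items PySem.Set.empty)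
          (ns0.filter (fun x => !(PySem.Dict.contains d x)))
        = collectGo ns0 (PySem.Dict.items (buildFirst (PySem.List.enumerate rows i) d)) PySem.Set.empty := by
  induction rows with
  | nil => intro i d ns0; simp [searchGo, buildFirst, PySem.List.enumerate]
  | cons row rest ih =>
    intro i d ns0
    rw [PySem.List.enumerate_cons]
    show searchGo (row :: rest) i _ _ = collectGo ns0 (PySem.Dict.items (buildFirst ((i, row) :: _) d)) _
    unfold searchGo buildFirst
    cases hp : (PySem.List.pyGet? row 0).bind PySem.Int.ofStr? with
    | none => simp
    | some cid =>
      simp only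
      have hc : (ns0.filter (fun x => !(PySem.Dict.contains d x))).contains cid
          = (ns0.contains cid && !(PySem.Dict.contains d cid)) :=
        pv_contains_filter ns0 _ cid
      by_cases hin : PySem.Set.contains (ns0.filter (fun x => !(PySem.Dict.contains d x))) cid = true
      · -- matched: cid ∈ ns0 and cid is a new key
        rw [if_pos hin]
        have hmem : ns0.contains cid = true ∧ PySem.Dict.contains d cid = false := by
          have h1 : (ns0.contains cid && !(PySem.Dict.contains d cid)) = true := by
            rw [← hc]; simpa [PySem.Set.contains] using hin
          constructor
          · exact (Bool.and_eq_true_iff.mp h1).1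
          · simpa using (Bool.and_eq_true_iff.mp h1).2
        rw [if_neg (by simp [hmem.2])]
        have hitems : (PySem.Dict.insert d cid i).items = d.items ++ [(cid, i)] := by
          exact PySem.Dict.items_insert_of_not_contains _ _ hmem.2
        have hrem : (match PySem.Set.remove? (ns0.filter (fun x => !(PySem.Dict.contains d x))) cid with
             | some ns' => ns'
             | none => ns0.filter (fun x => !(PySem.Dict.contains d x)))
            = ns0.filter (fun x => !(PySem.Dict.contains (PySem.Dict.insert d cid i) x)) := by
          unfold PySem.Set.remove?
          rw [if_pos hin]
          unfold PySem.Set.discard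
          rw [List.filter_filter]
          apply List.filter_congr
          intro x _
          rw [PySem.Dict.contains_insert]
          cases hxc : x == cid
          · simp [hxc]
          · have : x = cid := by simpa using hxc
            simp [this]
        have hlset : collectGo ns0 (PySem.Dict.insert d cid i).items PySem.Set.empty
            = PySem.Set.add (collectGo ns0 d.items PySem.Set.empty) i := by
          rw [hitems, pv_collect_append]
          have hm : cid ∈ ns0 := by simpa [List.contains_eq_mem] using hmem.1
          simp [collectGo, PySem.Set.contains, hm]
        rw [← ih, hrem, hlset]
      · -- not matched: cid already a key, or cid ∉ ns0; dict key set unchanged on ns0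
        rw [if_neg hin]
        by_cases hd : PySem.Dict.contains d cid = true
        · rw [if_pos hd, ih]
        · -- new key but cid ∉ ns0: filter and selection unchanged
          have hnot : ns0.contains cid = false := by
            have := hc
            simp only [PySem.Set.contains] at hin
            rw [this] at hin
            simpa [hd] using hin
          rw [if_neg hd, ← ih]
          have hitems : (PySem.Dict.insert d cid i).items = d.items ++ [(cid, i)] := by
            exact PySem.Dict.items_insert_of_not_contains _ _ (by simpa using hd)
          have hfil : ns0.filter (fun x => !(PySem.Dict.contains (PySem.Dict.insert d cid i) x))
              = ns0.filter (fun x => !(PySem.Dict.contains d x)) := by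
            apply List.filter_congr
            intro x hx
            rw [PySem.Dict.contains_insert]
            cases hxc : x == cid
            · simp [hxc]
            · have hxe : x = cid := by simpa using hxc
              subst hxe
              rw [List.contains_eq_mem] at hnot
              simp at hnot
              exact absurd hx hnot
          have hlset : collectGo ns0 (PySem.Dict.insert d cid i).items PySem.Set.empty
              = collectGo ns0 d.items PySem.Set.empty := by
            rw [hitems, pv_collect_append]
            have hm : cid ∉ ns0 := by simpa [List.contains_eq_mem] using hnot
            simp [collectGo, PySem.Set.contains, hm]
          rw [hfil, hlset]

-- ===== VERDICT (by name: the statement is the Claim_ definition above) =====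
theorem search_spec : Claim_equal_search := by
  intro city_list nset _ _
  unfold Spec_search search search_alt
  have h := pv_loop_eq city_list 0 PySem.Dict.empty nset
  simpa [PySem.Dict.empty, collectGo] using h
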